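-- pv_equiv track=rewrite | github.com/CorradoColaleo/CyberChallengeIT | TestDiAmmissione/Emails/emails.py | find_sum_of_times
-- ===== SOURCE A (Python) =====
-- def find_sum_of_times(N, M, t, f, emails):
--     total_time = 0
--
--     for email_time in emails:
--         current_time = email_time
--
--         for i in range(N):
--             if current_time % t[i] != 0:
--                 current_time += t[i] - (current_time % t[i])
--             current_time += f[i]
--
--         total_time += current_time
--
--     return total_time
-- ===== SOURCE B (Python) =====
-- def find_sum_of_times(N, M, t, f, emails):
--     # Group equal email start times with a multiplicity dict: the pipeline is a
--     # pure function of the start time, so it is run once per DISTINCT value and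
--     # weighted by its count; the round-up uses the closed form (-c) % t[i].
--     counts = {}
--     for e in emails:
--         counts[e] = counts.get(e, 0) + 1
--
--     def through(c):
--         for i in range(N):
--             c += (-c) % t[i] + f[i]
--         return c
--
--     return sum(k * through(v) for v, k in counts.items())
-- ===== Notes on version B (the rewrite author's own statement) =====
-- stated objective: alternative
-- what changed: B first builds a multiplicity dictionary of the email start times, then runs the server pipeline only once per DISTINCT start value (with the if-based round-up replaced by the closed form (-c) % t[i]) and sums count*result, instead of folding every email through all servers as A does.
import Mathlib
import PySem

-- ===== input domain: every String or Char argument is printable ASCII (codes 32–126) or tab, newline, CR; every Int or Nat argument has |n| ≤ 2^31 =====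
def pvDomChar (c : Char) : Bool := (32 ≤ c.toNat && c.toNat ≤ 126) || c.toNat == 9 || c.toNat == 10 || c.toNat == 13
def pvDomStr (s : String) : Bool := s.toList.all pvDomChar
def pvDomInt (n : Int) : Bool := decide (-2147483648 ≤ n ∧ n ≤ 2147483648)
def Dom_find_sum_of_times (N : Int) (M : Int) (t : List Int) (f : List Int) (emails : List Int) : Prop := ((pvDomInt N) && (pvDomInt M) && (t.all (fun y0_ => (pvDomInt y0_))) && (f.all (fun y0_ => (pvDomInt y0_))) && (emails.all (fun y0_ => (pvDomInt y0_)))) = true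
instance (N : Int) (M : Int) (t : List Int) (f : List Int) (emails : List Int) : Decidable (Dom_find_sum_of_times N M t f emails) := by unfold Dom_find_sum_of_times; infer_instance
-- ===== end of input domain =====

-- B groups equal email start times in a multiplicity dict and runs the server
-- pipeline once per distinct value (round-up via (-c) % t[i]); return value only.

-- ===== PORT A =====
def find_sum_of_times (N : Int) (M : Int) (t : List Int) (f : List Int) (emails : List Int) : Int :=
  emails.foldl (fun total_time email_time =>
    total_time +
      (PySem.List.pyRange 0 N 1).foldl (fun current_time i =>
        (if PySem.Int.mod current_time (PySem.List.pyGetD t i 0) ≠ 0 then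
          current_time + (PySem.List.pyGetD t i 0 - PySem.Int.mod current_time (PySem.List.pyGetD t i 0))
        else current_time) + PySem.List.pyGetD f i 0) email_time) 0

-- ===== PORT B =====
-- helper 'through' of Source B: one start time through all N servers
def pvThrough (N : Int) (t f : List Int) (c : Int) : Int :=
  (PySem.List.pyRange 0 N 1).foldl (fun c i =>
    c + PySem.Int.mod (-c) (PySem.List.pyGetD t i 0) + PySem.List.pyGetD f i 0) c

def find_sum_of_times_alt (N : Int) (M : Int) (t : List Int) (f : List Int) (emails : List Int) : Int :=
  let counts := emails.foldl (fun d e => d.insert e (d.getD e 0 + 1)) PySem.Dict.empty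
  (counts.items.map (fun p => p.2 * pvThrough N t f p.1)).sum

-- ===== PRECONDITION & SPEC =====
-- Pre_ excludes exactly the inputs on which the Python A raises: with emails
-- nonempty and 0 < N, an i < N with t[i] or f[i] missing (IndexError) or
-- t[i] = 0 (ZeroDivisionError).  (B raises on exactly the same inputs.)
def Pre_find_sum_of_times (N : Int) (M : Int) (t : List Int) (f : List Int) (emails : List Int) : Prop :=
  emails = [] ∨ N ≤ 0 ∨ (N ≤ t.length ∧ N ≤ f.length ∧ ∀ x ∈ t.take N.toNat, x ≠ 0)
instance (N : Int) (M : Int) (t : List Int) (f : List Int) (emails : List Int) : Decidable (Pre_find_sum_of_times N M t f emails) := by unfold Pre_find_sum_of_times; infer_instance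
def pvWitness_find_sum_of_times : Int × Int × List Int × List Int × List Int := (2, 0, [3, 2], [1, 4], [5, 7])

def Spec_find_sum_of_times (N : Int) (M : Int) (t : List Int) (f : List Int) (emails : List Int) (out : Int) : Prop := out = find_sum_of_times_alt N M t f emails
instance (N : Int) (M : Int) (t : List Int) (f : List Int) (emails : List Int) (out : Int) : Decidable (Spec_find_sum_of_times N M t f emails out) := by unfold Spec_find_sum_of_times; infer_instance

-- ===== CLAIM (what is proved, stated in full; the proofs are below) =====
def Claim_equal_find_sum_of_times : Prop := ∀ (N : Int) (M : Int) (t : List Int) (f : List Int) (emails : List Int), Dom_find_sum_of_times N M t f emails → Pre_find_sum_of_times N M t f emails → Spec_find_sum_of_times N M t f emails (find_sum_of_times N M t f emails)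

-- ===== LEMMAS AND PROOFS =====

-- A's per-email pipeline (the inner loop of A), as a function of the start time.
def pvThroughA (N : Int) (t f : List Int) (c : Int) : Int :=
  (PySem.List.pyRange 0 N 1).foldl (fun current_time i =>
    (if PySem.Int.mod current_time (PySem.List.pyGetD t i 0) ≠ 0 then
      current_time + (PySem.List.pyGetD t i 0 - PySem.Int.mod current_time (PySem.List.pyGetD t i 0))
    else current_time) + PySem.List.pyGetD f i 0) c

-- Python: (-c) % d = (d - c % d if c % d else 0), for positive d.
theorem pv_mod_neg_pos (c d : Int) (hd : 0 < d) :
    PySem.Int.mod (-c) d = if PySem.Int.mod c d = 0 then 0 else d - PySem.Int.mod c d := by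
  show Int.fmod (-c) d = if Int.fmod c d = 0 then 0 else d - Int.fmod c d
  rw [Int.fmod_eq_emod, Int.fmod_eq_emod]
  simp only [if_pos (Or.inl (le_of_lt hd)), add_zero]
  rw [Int.neg_emod]
  have hna : (d.natAbs : Int) = d := Int.natAbs_of_nonneg (le_of_lt hd)
  by_cases h : c % d = 0
  · rw [if_pos (Int.dvd_of_emod_eq_zero h), if_pos h]
  · rw [if_neg (fun hd2 => h (Int.emod_eq_zero_of_dvd hd2)), if_neg h, hna]

-- The same closed form for every nonzero divisor.
theorem pv_mod_neg (c d : Int) (hd : d ≠ 0) :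
    PySem.Int.mod (-c) d = if PySem.Int.mod c d = 0 then 0 else d - PySem.Int.mod c d := by
  rcases lt_or_gt_of_ne hd with h | h
  · have he : (0:Int) < -d := by omega
    have h1 : PySem.Int.mod (-c) d = -PySem.Int.mod c (-d) := by
      have := PySem.Int.mod_neg_neg c (-d); simpa using this
    have h2 : PySem.Int.mod c d = -PySem.Int.mod (-c) (-d) := by
      have := PySem.Int.mod_neg_neg (-c) (-d); simpa using this
    have h3 := pv_mod_neg_pos (-c) (-d) he
    simp only [neg_neg] at h3
    rw [h1, h2, h3]
    split_ifs <;> omega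
  · exact pv_mod_neg_pos c d h

-- A's per-server step equals B's per-server step when the period is nonzero.
theorem pv_step_eq (c ti fi : Int) (hti : ti ≠ 0) :
    (if PySem.Int.mod c ti ≠ 0 then c + (ti - PySem.Int.mod c ti) else c) + fi
      = c + PySem.Int.mod (-c) ti + fi := by
  rw [pv_mod_neg c ti hti]
  by_cases h : PySem.Int.mod c ti = 0 <;> simp [h] <;> omega

-- When all used periods are nonzero, A's pipeline equals B's pipeline.
theorem pv_through_eq (N : Int) (t f : List Int) (c : Int)
    (hnz : ∀ i ∈ PySem.List.pyRange 0 N 1, PySem.List.pyGetD t i 0 ≠ 0) :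
    pvThroughA N t f c = pvThrough N t f c := by
  unfold pvThroughA pvThrough
  exact PySem.List.foldl_congr_mem _ _ _ c (fun acc i hi => pv_step_eq acc _ _ (hnz i hi))

-- Summing a fold of additions is the sum of the mapped values.
theorem pv_foldl_add_sum {α : Type} (g : α → Int) (xs : List α) (a : Int) :
    xs.foldl (fun tot x => tot + g x) a = a + (xs.map g).sum := by
  induction xs generalizing a with
  | nil => simp
  | cons x xs ih => simp [ih]; ring

-- Regrouping: the sum of g over a list is the count-weighted sum over its distinct values.
theorem pv_sum_count (g : Int → Int) (xs : List Int) :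
    (xs.map g).sum = ((PySem.List.dedup xs).map (fun v => (xs.count v : Int) * g v)).sum := by
  have h1 := Finset.sum_list_map_count xs g
  have h2 : (PySem.List.dedup xs).toFinset = xs.toFinset := by
    apply Finset.ext; intro v; simp
  have h3 := List.sum_toFinset (fun v => (xs.count v : Int) * g v) (PySem.List.nodup_dedup xs)
  rw [h1, ← h3, h2]
  apply Finset.sum_congr rfl
  intro v _
  simp

-- B computes the count-weighted sum over the distinct email values.
theorem pv_alt_eq (N M : Int) (t f emails : List Int) :
    find_sum_of_times_alt N M t f emails = (emails.map (pvThrough N t f)).sum := by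
  unfold find_sum_of_times_alt
  rw [PySem.Dict.foldl_insert_getD_add_one_eq_counter]
  show (List.map (fun p => p.2 * pvThrough N t f p.1) (PySem.Dict.counter emails).items).sum = _
  rw [PySem.Dict.items_counter, pv_sum_count (pvThrough N t f) emails]
  simp [List.map_map, Function.comp_def, PySem.List.dedup_eq_ofList]

-- ===== VERDICT (by name: the statement is the Claim_ definition above) =====
theorem find_sum_of_times_spec : Claim_equal_find_sum_of_times := by
  intro N M t f emails _ hpre
  unfold Spec_find_sum_of_times
  have hA : find_sum_of_times N M t f emails = (emails.map (pvThroughA N t f)).sum := by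
    unfold find_sum_of_times
    show List.foldl (fun tot e => tot + pvThroughA N t f e) 0 emails = _
    rw [pv_foldl_add_sum (pvThroughA N t f) emails 0, zero_add]
  rw [hA, pv_alt_eq]
  rcases hpre with h | h | ⟨ht, hf, hz⟩
  · subst h; rfl
  · apply congrArg
    apply List.map_congr_left
    intro e _
    apply pv_through_eq
    intro i hi
    rw [PySem.List.mem_pyRange_one] at hi
    omega
  · apply congrArg
    apply List.map_congr_left
    intro e _
    apply pv_through_eq
    intro i hi
    rw [PySem.List.mem_pyRange_one] at hi
    have h0 : 0 ≤ i := hi.1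
    have hiN : i < N := hi.2
    rw [PySem.List.pyGetD_of_nonneg t 0 h0]
    have hlt : i.toNat < t.length := by omega
    have hmem : t.getD i.toNat 0 ∈ t.take N.toNat := by
      rw [List.getD_eq_getElem _ _ hlt]
      exact List.mem_take_iff_getElem.mpr ⟨i.toNat, by omega, by simp⟩
    exact hz _ hmem
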